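-- pv_equiv track=rewrite | github.com/Devihem/SoftUni-Python-Basic-Fundamental-Advance | 2_fundamental/05_exercise_lists_advanced/9_anonymous_threat.py | divide_list_cell_5_9
-- ===== SOURCE A (Python) =====
-- def divide_list_cell_5_9(item_list: list, divided_index: int, partitions: int):
--     segments_in_cell = len(item_list[divided_index])
--     max_item_in_cell = segments_in_cell // partitions
--     if partitions > len(item_list[divided_index]):
--         max_item_in_cell = 1
--     new_list_reformated = [""]
--     working_index = 0
--     for symbol in item_list[divided_index]:
--         if len(new_list_reformated) == partitions:
--             new_list_reformated[working_index] += symbol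
--             continue
--         if len(new_list_reformated[working_index]) == max_item_in_cell:
--             new_list_reformated += [""]
--         if len(new_list_reformated[working_index]) == max_item_in_cell:
--             working_index += 1
--
--         new_list_reformated[working_index] += symbol
--     item_list.pop(divided_index)
--
--     for index, value in enumerate(new_list_reformated):
--         item_list.insert(divided_index + index, value)
--     return item_list
-- ===== SOURCE B (Python) =====
-- def divide_list_cell_5_9(item_list: list, divided_index: int, partitions: int):
--     cell = item_list[divided_index]
--     m = max(1, len(cell) // partitions)
--     chunks = []
--     while len(chunks) < partitions - 1 and len(cell) > m:
--         chunks.append(cell[:m])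
--         cell = cell[m:]
--     chunks.append(cell)
--     item_list.pop(divided_index)
--     for k, chunk in enumerate(chunks):
--         item_list.insert(divided_index + k, chunk)
--     return item_list
-- ===== Notes on version B (the rewrite author's own statement) =====
-- stated objective: simpler
-- what changed: A builds the chunks by a character-by-character loop over the cell with a mutable working index and duplicated length tests; B computes the chunk size as max(1, len(cell)//partitions) and slices whole chunks off the front of the cell while fewer than partitions-1 chunks exist and more than one chunk's worth remains, the remainder becoming the last chunk; same pop/insert splice.
import Mathlib
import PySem

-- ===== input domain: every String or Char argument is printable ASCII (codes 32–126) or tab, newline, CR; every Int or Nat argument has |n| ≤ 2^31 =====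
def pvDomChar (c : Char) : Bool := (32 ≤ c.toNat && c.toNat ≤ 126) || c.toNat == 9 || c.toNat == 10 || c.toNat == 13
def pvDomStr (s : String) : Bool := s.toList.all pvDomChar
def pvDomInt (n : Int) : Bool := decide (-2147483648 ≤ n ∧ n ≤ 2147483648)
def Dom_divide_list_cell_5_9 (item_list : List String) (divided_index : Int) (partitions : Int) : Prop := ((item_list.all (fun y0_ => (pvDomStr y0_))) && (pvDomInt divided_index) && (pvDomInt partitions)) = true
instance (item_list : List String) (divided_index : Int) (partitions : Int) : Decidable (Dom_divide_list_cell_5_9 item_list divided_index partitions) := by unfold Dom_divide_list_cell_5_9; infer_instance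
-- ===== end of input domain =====

-- B replaces A's character-by-character chunk loop (mutable working index, duplicated
-- length tests) by slicing whole chunks of size max(1, len//partitions) off the cell while
-- fewer than partitions-1 chunks exist and more than one chunk's worth remains.
-- Both Pythons mutate item_list in place identically (pop + inserts); the equivalence
-- proved here is about the returned list (which is that mutated list).

-- ===== PORT A =====
-- one iteration of A's for-loop; state = (new_list_reformated, working_index);
-- chunk strings are carried as List Char (Lean's own String API is kernel-opaque).
-- new_list_reformated[working_index] is ported as getD (the index is always in
-- range while the loop runs, so the default is never taken).
def pvStepA (partitions maxItem : Int) (st : List (List Char) × Nat) (symbol : Char) : List (List Char) × Nat :=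
  if (st.1.length : Int) = partitions then
    (st.1.modify st.2 (fun s => s ++ [symbol]), st.2)
  else
    let lst1 := if ((st.1.getD st.2 []).length : Int) = maxItem then st.1 ++ [[]] else st.1
    let wi1 := if ((lst1.getD st.2 []).length : Int) = maxItem then st.2 + 1 else st.2
    (lst1.modify wi1 (fun s => s ++ [symbol]), wi1)

def divide_list_cell_5_9 (item_list : List String) (divided_index : Int) (partitions : Int) : List String :=
  match PySem.List.pyGet? item_list divided_index with
  | none => []          -- IndexError: excluded by Pre_
  | some cellS =>
    let cell := cellS.toList
    let segments_in_cell : Int := (cell.length : Int)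
    let div0 : Int := PySem.Int.floordiv segments_in_cell partitions   -- ZeroDivisionError for partitions = 0: excluded by Pre_
    let max_item_in_cell : Int := if partitions > segments_in_cell then 1 else div0
    let final := cell.foldl (pvStepA partitions max_item_in_cell) ([[]], 0)
    match PySem.List.pop? item_list divided_index with
    | none => []        -- IndexError: excluded by Pre_
    | some r =>
      (PySem.List.enumerate final.1).foldl
        (fun acc kv => PySem.List.insert acc (divided_index + kv.1) (String.ofList kv.2)) r.2

-- ===== PORT B =====
-- Source B's while loop; state = (chunks, cell); fuel = number of characters left in cell
-- (an iteration removes m ≥ 1 of them, so the fuel never runs out).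
-- After the loop Source B appends the remaining cell as the last chunk.
def pvLoopB (m : Nat) (p : Int) : Nat → List (List Char) → List Char → List (List Char)
  | 0, chunks, cell => chunks ++ [cell]
  | fuel + 1, chunks, cell =>
    if (chunks.length : Int) < p - 1 ∧ m < cell.length then
      pvLoopB m p fuel (chunks ++ [cell.take m]) (cell.drop m)
    else chunks ++ [cell]

def divide_list_cell_5_9_alt (item_list : List String) (divided_index : Int) (partitions : Int) : List String :=
  match PySem.List.pyGet? item_list divided_index with
  | none => []          -- IndexError: excluded by Pre_
  | some cellS =>
    let cell := cellS.toList
    -- m = max(1, len(cell) // partitions); ZeroDivisionError for partitions = 0: excluded by Pre_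
    let m : Int := max 1 (PySem.Int.floordiv (cell.length : Int) partitions)
    -- m ≥ 1, so comparing/slicing with m.toNat is exact
    let chunks := pvLoopB m.toNat partitions cell.length [] cell
    match PySem.List.pop? item_list divided_index with
    | none => []        -- IndexError: excluded by Pre_
    | some r =>
      (PySem.List.enumerate chunks).foldl
        (fun acc kv => PySem.List.insert acc (divided_index + kv.1) (String.ofList kv.2)) r.2

-- ===== PRECONDITION & SPEC =====
-- Pre_ excludes exactly the raising inputs: partitions = 0 (ZeroDivisionError) and an
-- out-of-range divided_index (IndexError); both A and B raise there.
def Pre_divide_list_cell_5_9 (item_list : List String) (divided_index : Int) (partitions : Int) : Prop :=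
  partitions ≠ 0 ∧ PySem.Raise.InRange item_list.length divided_index
instance (item_list : List String) (divided_index : Int) (partitions : Int) : Decidable (Pre_divide_list_cell_5_9 item_list divided_index partitions) := by unfold Pre_divide_list_cell_5_9; infer_instance

def pvWitness_divide_list_cell_5_9 : List String × Int × Int := (["ab", "cdefg"], 1, 2)

def Spec_divide_list_cell_5_9 (item_list : List String) (divided_index : Int) (partitions : Int) (out : List String) : Prop := out = divide_list_cell_5_9_alt item_list divided_index partitions
instance (item_list : List String) (divided_index : Int) (partitions : Int) (out : List String) : Decidable (Spec_divide_list_cell_5_9 item_list divided_index partitions out) := by unfold Spec_divide_list_cell_5_9; infer_instance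

-- ===== CLAIM (what is proved, stated in full; the proofs are below) =====
def Claim_equal_divide_list_cell_5_9 : Prop := ∀ (item_list : List String) (divided_index : Int) (partitions : Int), Dom_divide_list_cell_5_9 item_list divided_index partitions → Pre_divide_list_cell_5_9 item_list divided_index partitions → Spec_divide_list_cell_5_9 item_list divided_index partitions (divide_list_cell_5_9 item_list divided_index partitions)

-- ===== LEMMAS AND PROOFS =====

theorem pvGetD_mid (pre t : List (List Char)) (cur d : List Char) :
    (pre ++ cur :: t).getD pre.length d = cur := by
  simp [List.getD]

theorem pvModify_mid (pre t : List (List Char)) (cur : List Char) (f : List Char → List Char) :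
    (pre ++ cur :: t).modify pre.length f = pre ++ f cur :: t := by
  rw [List.modify_eq_take_cons_drop (by simp)]
  simp

-- reorganisation of A's loop: the same state machine, but emitting finished chunks
def pvG (m : Nat) (p : Int) : List Char → List Char → Int → List (List Char)
  | cur, [], _ => [cur]
  | cur, c :: rest, cnt =>
    if cnt + 1 = p then [cur ++ (c :: rest)]
    else if cur.length = m then cur :: pvG m p [c] rest (cnt + 1)
    else pvG m p (cur ++ [c]) rest cnt

theorem pvG_terminal (m : Nat) (p : Int) (cur xs : List Char) (cnt : Int) (h : cnt + 1 = p) :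
    pvG m p cur xs cnt = [cur ++ xs] := by
  cases xs with
  | nil => simp [pvG]
  | cons c rest => simp [pvG, h]

-- A's fold, started from state (done ++ [cur], done.length), yields done ++ pvG …
theorem pvFoldA_eq_G (mN : Nat) (p : Int) :
    ∀ (xs : List Char) (done : List (List Char)) (cur : List Char),
      xs.foldl (pvStepA p (mN : Int)) (done ++ [cur], done.length)
        = (done ++ pvG mN p cur xs (done.length : Int),
           done.length + (pvG mN p cur xs (done.length : Int)).length - 1) := by
  intro xs
  induction xs with
  | nil => intro done cur; simp [pvG]
  | cons c rest ih =>
    intro done cur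
    rw [List.foldl_cons]
    by_cases hterm : ((done.length : Int) + 1 = p)
    · -- terminal: every further character is appended to the last chunk
      have h1 : (((done ++ [cur]).length : Int) = p) := by simp; omega
      simp only [pvStepA, h1, if_pos]
      rw [pvModify_mid done [] cur]
      rw [ih done (cur ++ [c])]
      rw [pvG_terminal mN p cur (c :: rest) _ hterm, pvG_terminal mN p (cur ++ [c]) rest _ hterm]
      simp
    · have h1 : ¬ (((done ++ [cur]).length : Int) = p) := by simp; omega
      by_cases hfull : ((cur.length : Int) = (mN : Int))
      · -- current chunk full: start a new chunk and put c into it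
        have hg1 : ((done ++ [cur]).getD done.length []) = cur := pvGetD_mid done [] cur []
        have hg2 : (((done ++ [cur]) ++ [[]]).getD done.length []) = cur := by
          rw [show (done ++ [cur]) ++ [[]] = done ++ cur :: [[]] by simp]
          exact pvGetD_mid done [[]] cur []
        simp only [pvStepA, h1, if_false, hg1, hg2, hfull, if_true]
        have hsplit : (done ++ [cur]) ++ [[]] = done ++ cur :: [[]] := by simp
        rw [hsplit, show done.length + 1 = (done ++ [cur]).length by simp]
        rw [show done ++ cur :: [[]] = (done ++ [cur]) ++ [([] : List Char)] by simp]
        rw [pvModify_mid (done ++ [cur]) [] []]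
        rw [ih (done ++ [cur]) ([] ++ [c])]
        have hG : pvG mN p cur (c :: rest) (done.length : Int)
            = cur :: pvG mN p [c] rest ((done.length : Int) + 1) := by
          have : cur.length = mN := by exact_mod_cast hfull
          simp [pvG, hterm, this]
        rw [hG]
        simp only [List.length_append, List.length_cons]
        simp only [List.nil_append, List.length_nil, Nat.zero_add, Prod.mk.injEq]
        push_cast
        exact ⟨by simp, by omega⟩
      · -- current chunk not full: append c to it
        have hg1 : ((done ++ [cur]).getD done.length []) = cur := pvGetD_mid done [] cur []
        simp only [pvStepA, h1, if_false, hg1, hfull]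
        rw [pvModify_mid done [] cur]
        rw [ih done (cur ++ [c])]
        have hG : pvG mN p cur (c :: rest) (done.length : Int)
            = pvG mN p (cur ++ [c]) rest (done.length : Int) := by
          have : ¬ cur.length = mN := by exact_mod_cast hfull
          simp [pvG, hterm, this]
        rw [hG]

-- proof-side middle man: the chunk list as a plain (non-accumulator) recursion
def pvChunksB (m : Nat) (p : Int) : Nat → List Char → Int → List (List Char)
  | _, [], _ => []
  | 0, _ :: _, _ => []
  | fuel + 1, c :: rest, count =>
    if count = p - 1 then [c :: rest]
    else (c :: rest).take m :: pvChunksB m p fuel ((c :: rest).drop m) (count + 1)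

theorem pvChunksB_nil (m : Nat) (p : Int) (fuel : Nat) (cnt : Int) :
    pvChunksB m p fuel [] cnt = [] := by
  cases fuel <;> rfl

theorem pvChunksB_succ_cons (m : Nat) (p : Int) (f : Nat) (c : Char) (rest : List Char) (cnt : Int) :
    pvChunksB m p (f + 1) (c :: rest) cnt
      = if cnt = p - 1 then [c :: rest]
        else (c :: rest).take m :: pvChunksB m p f ((c :: rest).drop m) (cnt + 1) := rfl

-- pvG with a partially filled current chunk = the plain chunk recursion on the re-assembled rest
theorem pvG_eq_chunksB (m : Nat) (p : Int) (hm : 1 ≤ m) :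
    ∀ (xs cur : List Char) (cnt : Int) (fuel : Nat),
      cur.length ≤ m → cur ++ xs ≠ [] → (cur ++ xs).length ≤ fuel →
      pvG m p cur xs cnt = pvChunksB m p fuel (cur ++ xs) cnt := by
  intro xs
  induction xs with
  | nil =>
    intro cur cnt fuel hle hne hfuel
    simp only [List.append_nil] at *
    obtain ⟨c, t, rfl⟩ : ∃ c t, cur = c :: t := by
      cases cur with | nil => simp at hne | cons a b => exact ⟨a, b, rfl⟩
    obtain ⟨f, rfl⟩ : ∃ f, fuel = f + 1 := by
      cases fuel with | zero => simp at hfuel | succ f => exact ⟨f, rfl⟩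
    rw [pvChunksB_succ_cons]
    split_ifs with h1
    · rfl
    · rw [List.take_of_length_le hle, List.drop_eq_nil_of_le hle, pvChunksB_nil]
      rfl
  | cons c rest ih =>
    intro cur cnt fuel hle hne hfuel
    obtain ⟨f, rfl⟩ : ∃ f, fuel = f + 1 := by
      cases fuel with
      | zero => exact absurd hfuel (by simp)
      | succ f => exact ⟨f, rfl⟩
    obtain ⟨d, t, hdt⟩ : ∃ d t, cur ++ c :: rest = d :: t := by
      cases cur with | nil => exact ⟨c, rest, rfl⟩ | cons a b => exact ⟨a, b ++ c :: rest, rfl⟩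
    by_cases hterm : cnt + 1 = p
    · have h2 : cnt = p - 1 := by omega
      rw [hdt, pvChunksB_succ_cons, if_pos h2, ← hdt]
      simp [pvG, hterm]
    · have hterm' : ¬ cnt = p - 1 := by omega
      by_cases hfull : cur.length = m
      · rw [hdt, pvChunksB_succ_cons, if_neg hterm', ← hdt]
        rw [List.take_left' hfull, List.drop_left' hfull]
        simp only [pvG, if_neg hterm, hfull, if_true]
        congr 1
        have := ih [c] (cnt + 1) f (by simpa using hm) (by simp) (by simp at hfuel ⊢; omega)
        simpa using this
      · simp only [pvG, if_neg hterm, hfull, if_false]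
        have := ih (cur ++ [c]) cnt (f + 1)
          (by simp at hfull ⊢; omega) (by simp) (by simp at hfuel ⊢; omega)
        rw [show (cur ++ [c]) ++ rest = cur ++ c :: rest by simp] at this
        exact this

theorem pvLoopB_succ (m : Nat) (p : Int) (f : Nat) (chunks : List (List Char)) (cell : List Char) :
    pvLoopB m p (f + 1) chunks cell
      = if (chunks.length : Int) < p - 1 ∧ m < cell.length then
          pvLoopB m p f (chunks ++ [cell.take m]) (cell.drop m)
        else chunks ++ [cell] := rfl

-- B's accumulator loop = the plain chunk recursion, appended to the chunks so far
theorem pvLoopB_eq_chunksB (m : Nat) (p : Int) (hm : 1 ≤ m) :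
    ∀ (fuel : Nat) (cell : List Char) (chunks : List (List Char)),
      cell.length ≤ fuel → (chunks.length : Int) ≤ p - 1 →
      pvLoopB m p fuel chunks cell
        = chunks ++ (if cell = [] then [[]] else pvChunksB m p fuel cell (chunks.length : Int)) := by
  intro fuel
  induction fuel with
  | zero =>
    intro cell chunks hf hc
    have : cell = [] := by cases cell with | nil => rfl | cons a b => simp at hf
    subst this
    simp [pvLoopB]
  | succ f ih =>
    intro cell chunks hf hc
    cases cell with
    | nil => simp [pvLoopB]
    | cons c rest =>
      rw [if_neg (by simp)]
      by_cases hlast : (chunks.length : Int) = p - 1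
      · have hcond : ¬ ((chunks.length : Int) < p - 1 ∧ m < (c :: rest).length) := by
          rintro ⟨h1, _⟩; omega
        rw [pvLoopB_succ, if_neg hcond, pvChunksB_succ_cons, if_pos hlast]
      · have hlt : (chunks.length : Int) < p - 1 := by omega
        rw [pvChunksB_succ_cons, if_neg hlast]
        by_cases hbig : m < (c :: rest).length
        · rw [pvLoopB_succ, if_pos ⟨hlt, hbig⟩]
          rw [ih ((c :: rest).drop m) (chunks ++ [(c :: rest).take m])
              (by simp at hf ⊢; omega)
              (by simp; omega)]
          have hdne : (c :: rest).drop m ≠ [] := by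
            simp only [ne_eq, List.drop_eq_nil_iff]
            simp at hbig ⊢; omega
          rw [if_neg hdne]
          simp
        · have hcond : ¬ ((chunks.length : Int) < p - 1 ∧ m < (c :: rest).length) := by
            rintro ⟨_, h2⟩; exact hbig h2
          rw [pvLoopB_succ, if_neg hcond]
          have hle : (c :: rest).length ≤ m := by omega
          rw [List.take_of_length_le hle, List.drop_eq_nil_of_le hle, pvChunksB_nil]
-- with a negative partition count neither loop splits: A's branch tests never fire …
theorem pvFoldA_neg (p maxItem : Int) (hp : ¬ (0 < p)) (hmax : maxItem < 0) :
    ∀ (xs : List Char) (done : List (List Char)) (cur : List Char),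
      xs.foldl (pvStepA p maxItem) (done ++ [cur], done.length)
        = (done ++ [cur ++ xs], done.length) := by
  intro xs
  induction xs with
  | nil => intro done cur; simp
  | cons c rest ih =>
    intro done cur
    rw [List.foldl_cons]
    have h1 : ¬ (((done ++ [cur]).length : Int) = p) := by simp; omega
    have h2 : ¬ (((done ++ [cur]).getD done.length []).length : Int) = maxItem := by
      rw [pvGetD_mid]; omega
    simp only [pvStepA, h1, if_false, h2]
    rw [pvModify_mid done [] cur]
    simpa using ih done (cur ++ [c])

-- … and a positive count floor-divided by a negative one is negative
theorem pvFdiv_neg (n p : Int) (hn : 1 ≤ n) (hp : p < 0) : PySem.Int.floordiv n p < 0 := by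
  have heq := PySem.Int.floordiv_mul_add_mod n p
  have hb := PySem.Int.mod_neg_bounds n hp
  rcases lt_or_ge (PySem.Int.floordiv n p) 0 with h | h
  · exact h
  · exfalso
    have : PySem.Int.floordiv n p * p ≤ 0 := mul_nonpos_of_nonneg_of_nonpos h (le_of_lt hp)
    linarith [hb.2]

-- the chunk lists of the two ports agree
theorem pvChunks_eq (p : Int) (hp : p ≠ 0) (cell : List Char) :
    (cell.foldl (pvStepA p (if p > (cell.length : Int) then 1
                            else PySem.Int.floordiv (cell.length : Int) p)) ([[]], 0)).1
      = pvLoopB (max 1 (PySem.Int.floordiv (cell.length : Int) p)).toNat p cell.length [] cell := by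
  by_cases hneg : p ≤ 0
  · have hneg' : p < 0 := lt_of_le_of_ne hneg hp
    cases cell with
    | nil => simp [pvLoopB]
    | cons c rest =>
      have hgt : ¬ (p > ((c :: rest).length : Int)) := by
        have : (0 : Int) ≤ ((c :: rest).length : Int) := by positivity
        omega
      rw [if_neg hgt]
      have hmax : PySem.Int.floordiv ((c :: rest).length : Int) p < 0 :=
        pvFdiv_neg _ p (by simp) hneg'
      have hA := congrArg Prod.fst (pvFoldA_neg p _ (by omega) hmax (c :: rest) [] [])
      simp only [List.nil_append, List.length_nil] at hA
      rw [hA]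
      have hcond : ¬ ((([] : List (List Char)).length : Int) < p - 1
          ∧ (max 1 (PySem.Int.floordiv ((c :: rest).length : Int) p)).toNat < (c :: rest).length) := by
        rintro ⟨h1, _⟩; simp at h1; omega
      simp only [List.length_cons] at hcond ⊢
      rw [pvLoopB_succ]
      simp only [List.length_cons]
      rw [if_neg hcond]
      simp
  · have hppos : 0 < p := by omega
    set n : Int := (cell.length : Int) with hn
    have hn0 : 0 ≤ n := by positivity
    have hq0 : 0 ≤ PySem.Int.floordiv n p :=
      (PySem.Int.le_floordiv_iff_mul_le (a := n) (b := p) (q := 0) hppos).mpr (by omega)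
    set mI : Int := if PySem.Int.floordiv n p = 0 then (1 : Int) else PySem.Int.floordiv n p with hmI
    -- A's if-correction and B's max both compute mI
    have hsame : (if p > n then (1 : Int) else PySem.Int.floordiv n p) = mI := by
      rw [hmI]
      by_cases hbig : p > n
      · have : PySem.Int.floordiv n p < 1 := by
          rw [PySem.Int.floordiv_lt_iff_lt_mul hppos]; omega
        rw [if_pos hbig, if_pos (by omega)]
      · have : 1 ≤ PySem.Int.floordiv n p := by
          rw [PySem.Int.le_floordiv_iff_mul_le hppos]; omega
        rw [if_neg hbig, if_neg (by omega)]
    have hmaxeq : max 1 (PySem.Int.floordiv n p) = mI := by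
      rw [hmI]; split_ifs with h
      · omega
      · omega
    have hm1 : 1 ≤ mI := by
      rw [hmI]; split_ifs with h
      · omega
      · omega
    have hcast : mI = ((mI.toNat : Nat) : Int) := by omega
    rw [hsame, hmaxeq]
    conv_lhs => rw [hcast]
    cases cell with
    | nil => simp [pvLoopB]
    | cons c rest =>
      have hA := pvFoldA_eq_G mI.toNat p (c :: rest) [] []
      simp only [List.nil_append, List.length_nil, Nat.cast_zero] at hA
      rw [hA]
      have hmN : 1 ≤ mI.toNat := by omega
      have hB := pvLoopB_eq_chunksB mI.toNat p hmN (c :: rest).length (c :: rest) []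
        (le_refl _) (by simp; omega)
      rw [hB, if_neg (by simp)]
      have hG := pvG_eq_chunksB mI.toNat p hmN (c :: rest) [] 0 (c :: rest).length
        (by simp) (by simp) (by simp)
      simp only [List.nil_append] at hG
      simp only [List.length_nil, Nat.cast_zero, List.nil_append]
      exact hG

-- ===== VERDICT (by name: the statement is the Claim_ definition above) =====
theorem divide_list_cell_5_9_spec : Claim_equal_divide_list_cell_5_9 := by
  intro item_list divided_index partitions _hdom hpre
  unfold Spec_divide_list_cell_5_9
  obtain ⟨hp, _hidx⟩ := hpre
  unfold divide_list_cell_5_9 divide_list_cell_5_9_alt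
  cases h1 : PySem.List.pyGet? item_list divided_index with
  | none => rfl
  | some cellS =>
    cases h2 : PySem.List.pop? item_list divided_index with
    | none => rfl
    | some r =>
      simp only []
      rw [pvChunks_eq partitions hp cellS.toList]
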